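-- pv_equiv track=rewrite | github.com/AlanValdevenito/Teoria-de-Algoritmos | SEGUNDA-CURSADA/RECUPERATORIOS/4-PD/2024-0C-2.py | juego_dinamico
-- ===== SOURCE A (Python) =====
-- def juego_dinamico(monedas, n):
--     mem = [[0 for _ in range(n)] for _ in range(n)]
--
--     # Caso base 1
--     for i in range(n):
--         mem[i][i] = monedas[i]
--
--     # Caso base 2
--     for i in range(n-1):
--         mem[i][i+1] = max(monedas[i], monedas[i+1])
--
--     for ventana in range(2, n):
--         for m_i in range(0, n - ventana):
--             m_d = m_i + ventana
--
--             # 1) Pepe elige la moneda de la izquierda (m_i) y elige la moneda de la izquierda (m_i+1) para su hermano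
--             opcion_1 = monedas[m_i] + mem[m_i+2][m_d] * (monedas[m_i+1] <= monedas[m_d] if m_i+2 <= m_d else 0)
--
--             # 2) Pepe elige la moneda de la izquierda (m_i) y elige la moneda de la derecha (m_d) para su hermano
--             opcion_2 = monedas[m_i] + mem[m_i+1][m_d-1] * (monedas[m_i+1] >= monedas[m_d] if m_i+1 <= m_d-1 else 0)
--
--             # 3) Pepe elige la moneda de la derecha (m_d) y elige la moneda de la izquierda (m_i) para su hermano
--             opcion_3 = monedas[m_d] + mem[m_i+1][m_d-1] * (monedas[m_i] <= monedas[m_d-1] if m_i+1 <= m_d-1 else 0)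
--
--             # 4) Pepe elige la moneda de la derecha (m_d) y elige la moneda de la derecha (m_d-1)  para su hermano
--             opcion_4 = monedas[m_d] + mem[m_i][m_d-2] * (monedas[m_i] >= monedas[m_d-1] if m_i <= m_d-2 else 0)
--
--             mem[m_i][m_d] = max(opcion_1, opcion_2, opcion_3, opcion_4)
--
--     return mem
-- ===== SOURCE B (Python) =====
-- def juego_dinamico(monedas, n):
--     # Top-down memoized recursion over intervals (i, j) instead of A's
--     # iterative window-by-window fill of a preallocated table.
--     memo = {}
--
--     def valor(i, j):
--         if (i, j) not in memo:
--             if j == i: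
--                 v = monedas[i]
--             elif j == i + 1:
--                 v = max(monedas[i], monedas[j])
--             else:
--                 der = valor(i + 2, j)
--                 izq = valor(i + 1, j - 1)
--                 amb = valor(i, j - 2)
--                 o1 = monedas[i] + der * (monedas[i + 1] <= monedas[j])
--                 o2 = monedas[i] + izq * (monedas[j] <= monedas[i + 1])
--                 o3 = monedas[j] + izq * (monedas[i] <= monedas[j - 1])
--                 o4 = monedas[j] + amb * (monedas[j - 1] <= monedas[i])
--                 v = max(o1, o2, o3, o4)
--             memo[(i, j)] = v
--         return memo[(i, j)]
--
--     return [[valor(i, j) if i <= j else 0 for j in range(n)] for i in range(n)]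
-- ===== Notes on version B (the rewrite author's own statement) =====
-- stated objective: alternative
-- what changed: Replaces A's iterative window-by-window fill of a preallocated mutable n x n table by a top-down memoized recursion valor(i,j) over intervals (a dict memo, recursion on the interval structure), assembling the output grid from the memoized values.
import Mathlib
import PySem

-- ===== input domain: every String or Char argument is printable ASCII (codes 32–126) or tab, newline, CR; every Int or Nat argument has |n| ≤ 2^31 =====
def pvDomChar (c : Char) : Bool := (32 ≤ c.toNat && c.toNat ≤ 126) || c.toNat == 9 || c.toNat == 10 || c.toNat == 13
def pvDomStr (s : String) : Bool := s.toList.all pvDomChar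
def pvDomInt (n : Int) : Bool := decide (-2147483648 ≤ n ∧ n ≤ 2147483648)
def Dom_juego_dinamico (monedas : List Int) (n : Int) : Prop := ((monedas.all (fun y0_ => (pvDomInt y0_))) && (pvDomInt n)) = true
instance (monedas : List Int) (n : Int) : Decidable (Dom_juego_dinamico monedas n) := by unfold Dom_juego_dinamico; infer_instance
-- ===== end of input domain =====

-- B replaces A's iterative window-by-window fill of a preallocated n×n table by a
-- top-down memoized recursion over intervals (objective: alternative decomposition).

-- ===== PORT A =====
def juego_dinamico (monedas : List Int) (n : Int) : List (List Int) :=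
  let mem := (PySem.List.pyRange 0 n 1).map (fun _ => (PySem.List.pyRange 0 n 1).map (fun _ => (0 : Int)))
  let mem := (PySem.List.pyRange 0 n 1).foldl (fun mem i =>
      PySem.List.pySetD mem i (PySem.List.pySetD (PySem.List.pyGetD mem i []) i
        (PySem.List.pyGetD monedas i 0))) mem
  let mem := (PySem.List.pyRange 0 (n-1) 1).foldl (fun mem i =>
      PySem.List.pySetD mem i (PySem.List.pySetD (PySem.List.pyGetD mem i []) (i+1)
        (max (PySem.List.pyGetD monedas i 0) (PySem.List.pyGetD monedas (i+1) 0)))) mem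
  let mem := (PySem.List.pyRange 2 n 1).foldl (fun mem ventana =>
      (PySem.List.pyRange 0 (n - ventana) 1).foldl (fun mem m_i =>
        let m_d := m_i + ventana
        let o1 := PySem.List.pyGetD monedas m_i 0 +
          PySem.List.pyGetD (PySem.List.pyGetD mem (m_i+2) []) m_d 0 *
            (if m_i+2 ≤ m_d then (if PySem.List.pyGetD monedas (m_i+1) 0 ≤ PySem.List.pyGetD monedas m_d 0 then 1 else 0) else 0)
        let o2 := PySem.List.pyGetD monedas m_i 0 +
          PySem.List.pyGetD (PySem.List.pyGetD mem (m_i+1) []) (m_d-1) 0 *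
            (if m_i+1 ≤ m_d-1 then (if PySem.List.pyGetD monedas m_d 0 ≤ PySem.List.pyGetD monedas (m_i+1) 0 then 1 else 0) else 0)
        let o3 := PySem.List.pyGetD monedas m_d 0 +
          PySem.List.pyGetD (PySem.List.pyGetD mem (m_i+1) []) (m_d-1) 0 *
            (if m_i+1 ≤ m_d-1 then (if PySem.List.pyGetD monedas m_i 0 ≤ PySem.List.pyGetD monedas (m_d-1) 0 then 1 else 0) else 0)
        let o4 := PySem.List.pyGetD monedas m_d 0 +
          PySem.List.pyGetD (PySem.List.pyGetD mem m_i []) (m_d-2) 0 *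
            (if m_i ≤ m_d-2 then (if PySem.List.pyGetD monedas (m_d-1) 0 ≤ PySem.List.pyGetD monedas m_i 0 then 1 else 0) else 0)
        PySem.List.pySetD mem m_i (PySem.List.pySetD (PySem.List.pyGetD mem m_i []) m_d
          (max (max (max o1 o2) o3) o4))) mem) mem
  mem

-- ===== PORT B =====
-- the inner function 'valor' of Source B; the dict 'memo' is threaded through as state.
-- 'fuel' only makes the recursion structural (unreachable 0-case for the calls made below).
def pvValorB (monedas : List Int) : Nat → PySem.Dict (Int × Int) Int → Int → Int → Int × PySem.Dict (Int × Int) Int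
  | 0, memo, _, _ => (0, memo)
  | fuel+1, memo, i, j =>
      if memo.contains (i, j) then (memo.getD (i, j) 0, memo)
      else
        let vm : Int × PySem.Dict (Int × Int) Int :=
          if j = i then (PySem.List.pyGetD monedas i 0, memo)
          else if j = i + 1 then
            (max (PySem.List.pyGetD monedas i 0) (PySem.List.pyGetD monedas j 0), memo)
          else
            let r1 := pvValorB monedas fuel memo (i+2) j
            let der := r1.1
            let r2 := pvValorB monedas fuel r1.2 (i+1) (j-1)
            let izq := r2.1
            let r3 := pvValorB monedas fuel r2.2 i (j-2)
            let amb := r3.1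
            let o1 := PySem.List.pyGetD monedas i 0 + der *
              (if PySem.List.pyGetD monedas (i+1) 0 ≤ PySem.List.pyGetD monedas j 0 then 1 else 0)
            let o2 := PySem.List.pyGetD monedas i 0 + izq *
              (if PySem.List.pyGetD monedas j 0 ≤ PySem.List.pyGetD monedas (i+1) 0 then 1 else 0)
            let o3 := PySem.List.pyGetD monedas j 0 + izq *
              (if PySem.List.pyGetD monedas i 0 ≤ PySem.List.pyGetD monedas (j-1) 0 then 1 else 0)
            let o4 := PySem.List.pyGetD monedas j 0 + amb *
              (if PySem.List.pyGetD monedas (j-1) 0 ≤ PySem.List.pyGetD monedas i 0 then 1 else 0)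
            (max (max (max o1 o2) o3) o4, r3.2)
        let memo := vm.2.insert (i, j) vm.1
        (memo.getD (i, j) 0, memo)

def juego_dinamico_alt (monedas : List Int) (n : Int) : List (List Int) :=
  ((PySem.List.pyRange 0 n 1).foldl
    (fun (p : List (List Int) × PySem.Dict (Int × Int) Int) i =>
      let q := (PySem.List.pyRange 0 n 1).foldl
        (fun (q : List Int × PySem.Dict (Int × Int) Int) j =>
          if i ≤ j then
            let r := pvValorB monedas n.toNat q.2 i j
            (q.1 ++ [r.1], r.2)
          else (q.1 ++ [(0 : Int)], q.2)) ([], p.2)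
      (p.1 ++ [q.1], q.2)) ([], PySem.Dict.empty)).1

-- ===== PRECONDITION & SPEC =====
-- Pre_ excludes exactly the inputs where A raises IndexError: monedas[i] for i < n needs n ≤ len(monedas).
def Pre_juego_dinamico (monedas : List Int) (n : Int) : Prop := n ≤ (monedas.length : Int)
instance (monedas : List Int) (n : Int) : Decidable (Pre_juego_dinamico monedas n) := by unfold Pre_juego_dinamico; infer_instance
def pvWitness_juego_dinamico : List Int × Int := ([3, 1, 5, 2], 4)

def Spec_juego_dinamico (monedas : List Int) (n : Int) (out : List (List Int)) : Prop := out = juego_dinamico_alt monedas n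
instance (monedas : List Int) (n : Int) (out : List (List Int)) : Decidable (Spec_juego_dinamico monedas n out) := by unfold Spec_juego_dinamico; infer_instance

-- ===== CLAIM (what is proved, stated in full; the proofs are below) =====
def Claim_equal_juego_dinamico : Prop := ∀ (monedas : List Int) (n : Int), Dom_juego_dinamico monedas n → Pre_juego_dinamico monedas n → Spec_juego_dinamico monedas n (juego_dinamico monedas n)

-- ===== LEMMAS AND PROOFS =====
-- value of the game: the common recursive characterisation of both tables
def pvV (g : Nat → Int) (i j : Nat) : Int :=
  if _h1 : j ≤ i then g i
  else if _h2 : j = i + 1 then max (g i) (g j)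
  else
    let o1 := g i + pvV g (i+2) j * (if g (i+1) ≤ g j then 1 else 0)
    let o2 := g i + pvV g (i+1) (j-1) * (if g j ≤ g (i+1) then 1 else 0)
    let o3 := g j + pvV g (i+1) (j-1) * (if g i ≤ g (j-1) then 1 else 0)
    let o4 := g j + pvV g i (j-2) * (if g (j-1) ≤ g i then 1 else 0)
    max (max (max o1 o2) o3) o4
termination_by j - i
decreasing_by all_goals omega

def pvRow (g : Nat → Int) (N i : Nat) : List Int :=
  (List.range N).map (fun j => if i ≤ j then pvV g i j else 0)

def pvTgt (g : Nat → Int) (N : Nat) : List (List Int) :=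
  (List.range N).map (pvRow g N)

def pvGetC (mem : List (List Int)) (i j : Nat) : Int := (mem.getD i []).getD j 0
def pvSetC (mem : List (List Int)) (i j : Nat) (v : Int) : List (List Int) :=
  mem.set i ((mem.getD i []).set j v)
def pvRect (N : Nat) (mem : List (List Int)) : Prop :=
  mem.length = N ∧ ∀ r ∈ mem, r.length = N

-- table state after all windows ≤ w have been filled
def pvTS (g : Nat → Int) (N w : Nat) (mem : List (List Int)) : Prop :=
  pvRect N mem ∧ ∀ i j, i < N → j < N →
    pvGetC mem i j = if i ≤ j ∧ j - i ≤ w then pvV g i j else 0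

theorem pvV_base1 (g : Nat → Int) (i : Nat) : pvV g i i = g i := by
  rw [pvV]; simp

theorem pvV_base2 (g : Nat → Int) (i : Nat) : pvV g i (i+1) = max (g i) (g (i+1)) := by
  rw [pvV]; simp

theorem pvV_step (g : Nat → Int) (i j : Nat) (h : i + 2 ≤ j) :
    pvV g i j =
      max (max (max (g i + pvV g (i+2) j * (if g (i+1) ≤ g j then 1 else 0))
                    (g i + pvV g (i+1) (j-1) * (if g j ≤ g (i+1) then 1 else 0)))
               (g j + pvV g (i+1) (j-1) * (if g i ≤ g (j-1) then 1 else 0)))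
          (g j + pvV g i (j-2) * (if g (j-1) ≤ g i then 1 else 0)) := by
  rw [pvV]
  rw [dif_neg (by omega), dif_neg (by omega)]
theorem pvRect_setC {N : Nat} {mem : List (List Int)} (h : pvRect N mem) (i j : Nat) (v : Int) :
    pvRect N (pvSetC mem i j v) := by
  obtain ⟨h1, h2⟩ := h
  by_cases hi : i < mem.length
  · refine ⟨by simp [pvSetC, h1], ?_⟩
    intro r hr
    rcases List.mem_or_eq_of_mem_set hr with h | h
    · exact h2 r h
    · subst h
      rw [List.getD_eq_getElem _ _ hi, List.length_set]
      exact h2 _ (List.getElem_mem hi)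
  · unfold pvSetC
    rw [List.set_eq_of_length_le (by omega)]
    exact ⟨h1, h2⟩

theorem pvRect_row_len {N : Nat} {mem : List (List Int)} (h : pvRect N mem) {i : Nat}
    (hi : i < N) : (mem.getD i []).length = N := by
  obtain ⟨h1, h2⟩ := h
  rw [List.getD_eq_getElem _ _ (by omega)]
  exact h2 _ (List.getElem_mem (by omega))

theorem pvGetC_setC {N : Nat} {mem : List (List Int)} (h : pvRect N mem) {i j : Nat}
    (hi : i < N) (hj : j < N) (v : Int) (i' j' : Nat) :
    pvGetC (pvSetC mem i j v) i' j' = if i' = i ∧ j' = j then v else pvGetC mem i' j' := by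
  have hlen : (mem.getD i []).length = N := pvRect_row_len h hi
  have hml : mem.length = N := h.1
  unfold pvGetC pvSetC
  simp only [List.getD_eq_getElem?_getD, List.getElem?_set]
  by_cases hii : i' = i
  · subst hii
    simp only [if_pos (by omega : i' < mem.length)]
    simp only [if_true, true_and, Option.getD_some]
    rw [List.getD_eq_getElem?_getD] at hlen
    by_cases hjj : j' = j
    · subst hjj
      simp [hlen, hj]
    · rw [List.getElem?_set_ne (by omega), if_neg hjj]
  · rw [if_neg (by tauto), if_neg (by omega)]

theorem pvFoldlRangeInv {α : Type} (f : α → Nat → α) (Q : Nat → α → Prop) (t : Nat) (a : α)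
    (h0 : Q 0 a) (hstep : ∀ k b, k < t → Q k b → Q (k+1) (f b k)) :
    Q t ((List.range t).foldl f a) := by
  induction t with
  | zero => simpa using h0
  | succ t ih =>
    rw [List.range_succ, List.foldl_append]
    exact hstep t _ (Nat.lt_succ_self t) (ih (fun k b hk => hstep k b (by omega)))

def pvInv1 (g : Nat → Int) (N t : Nat) (mem : List (List Int)) : Prop :=
  pvRect N mem ∧ ∀ i j, i < N → j < N →
    pvGetC mem i j = if i = j ∧ i < t then g i else 0

def pvInv2 (g : Nat → Int) (N t : Nat) (mem : List (List Int)) : Prop :=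
  pvRect N mem ∧ ∀ i j, i < N → j < N →
    pvGetC mem i j = if i = j then g i
      else if j = i+1 ∧ i < t then max (g i) (g j) else 0

def pvInvI (g : Nat → Int) (N w t : Nat) (mem : List (List Int)) : Prop :=
  pvRect N mem ∧ ∀ i j, i < N → j < N →
    pvGetC mem i j = if i ≤ j ∧ (j - i + 1 ≤ w ∨ (j - i = w ∧ i < t)) then pvV g i j else 0

def pvStepVal (g : Nat → Int) (mem : List (List Int)) (t w : Nat) : Int :=
  max (max (max (g t + pvGetC mem (t+2) (t+w) * (if g (t+1) ≤ g (t+w) then 1 else 0))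
                (g t + pvGetC mem (t+1) (t+w-1) * (if g (t+w) ≤ g (t+1) then 1 else 0)))
           (g (t+w) + pvGetC mem (t+1) (t+w-1) * (if g t ≤ g (t+w-1) then 1 else 0)))
      (g (t+w) + pvGetC mem t (t+w-2) * (if g (t+w-1) ≤ g t then 1 else 0))

theorem pvLoop1 (g : Nat → Int) (N : Nat) (mem : List (List Int))
    (h : pvRect N mem ∧ ∀ i j, i < N → j < N → pvGetC mem i j = 0) :
    pvInv1 g N N ((List.range N).foldl (fun mem k => pvSetC mem k k (g k)) mem) := by
  refine pvFoldlRangeInv _ (pvInv1 g N) N mem ⟨h.1, fun i j hi hj => by simp [h.2 i j hi hj]⟩ ?_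
  intro k b hk hQ
  refine ⟨pvRect_setC hQ.1 _ _ _, ?_⟩
  intro i j hi hj
  rw [pvGetC_setC hQ.1 hk hk _ i j, hQ.2 i j hi hj]
  by_cases hc : i = k ∧ j = k
  · obtain ⟨rfl, rfl⟩ := hc
    rw [if_pos ⟨rfl, rfl⟩, if_pos ⟨rfl, by omega⟩]
  · rw [if_neg hc]
    by_cases hc2 : i = j ∧ i < k
    · rw [if_pos hc2, if_pos (by omega)]
    · rw [if_neg hc2, if_neg (by omega)]

theorem pvLoop2 (g : Nat → Int) (N : Nat) (mem : List (List Int)) (h : pvInv1 g N N mem) :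
    pvInv2 g N (N-1)
      ((List.range (N-1)).foldl (fun mem k => pvSetC mem k (k+1) (max (g k) (g (k+1)))) mem) := by
  refine pvFoldlRangeInv _ (pvInv2 g N) (N-1) mem
    ⟨h.1, fun i j hi hj => by rw [h.2 i j hi hj]; split_ifs with h1 h2 h3 <;> first | rfl | omega⟩ ?_
  intro k b hk hQ
  refine ⟨pvRect_setC hQ.1 _ _ _, ?_⟩
  intro i j hi hj
  rw [pvGetC_setC hQ.1 (by omega) (by omega) _ i j, hQ.2 i j hi hj]
  by_cases hc : i = k ∧ j = k+1
  · obtain ⟨rfl, rfl⟩ := hc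
    rw [if_pos ⟨rfl, rfl⟩, if_neg (by omega), if_pos (by omega)]
  · rw [if_neg hc]
    split_ifs with h1 h2 h3 <;> first | rfl | omega

theorem pvInv2_TS (g : Nat → Int) (N : Nat) (mem : List (List Int)) (h : pvInv2 g N (N-1) mem) :
    pvTS g N 1 mem := by
  refine ⟨h.1, fun i j hi hj => ?_⟩
  rw [h.2 i j hi hj]
  by_cases h1 : i = j
  · subst h1; rw [if_pos rfl, if_pos ⟨le_refl _, by omega⟩, pvV_base1]
  · rw [if_neg h1]
    by_cases h2 : j = i+1
    · subst h2; rw [if_pos ⟨rfl, by omega⟩, if_pos (by omega), pvV_base2]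
    · rw [if_neg (by tauto), if_neg (by omega)]

theorem pvInner (g : Nat → Int) (N w : Nat) (hw : 2 ≤ w) (mem : List (List Int))
    (h : pvTS g N (w-1) mem) :
    pvTS g N w ((List.range (N-w)).foldl
      (fun mem t => pvSetC mem t (t+w) (pvStepVal g mem t w)) mem) := by
  have hQend : pvInvI g N w (N-w) ((List.range (N-w)).foldl
      (fun mem t => pvSetC mem t (t+w) (pvStepVal g mem t w)) mem) := by
    refine pvFoldlRangeInv _ (pvInvI g N w) (N-w) mem
      ⟨h.1, fun i j hi hj => by
        rw [h.2 i j hi hj]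
        split_ifs with h1 h2 <;> first | rfl | omega⟩ ?_
    intro t b ht hQ
    have hval : pvStepVal g b t w = pvV g t (t+w) := by
      unfold pvStepVal
      rw [hQ.2 (t+2) (t+w) (by omega) (by omega),
          hQ.2 (t+1) (t+w-1) (by omega) (by omega),
          hQ.2 t (t+w-2) (by omega) (by omega),
          if_pos (by omega : (t+2 ≤ t+w ∧ (t+w-(t+2)+1 ≤ w ∨ (t+w-(t+2) = w ∧ t+2 < t)))),
          if_pos (by omega : (t+1 ≤ t+w-1 ∧ (t+w-1-(t+1)+1 ≤ w ∨ (t+w-1-(t+1) = w ∧ t+1 < t)))),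
          if_pos (by omega : (t ≤ t+w-2 ∧ (t+w-2-t+1 ≤ w ∨ (t+w-2-t = w ∧ t < t)))),
          pvV_step g t (t+w) (by omega)]
    rw [hval]
    refine ⟨pvRect_setC hQ.1 _ _ _, ?_⟩
    intro i j hi hj
    rw [pvGetC_setC hQ.1 (by omega) (by omega) _ i j, hQ.2 i j hi hj]
    by_cases hc : i = t ∧ j = t + w
    · obtain ⟨rfl, rfl⟩ := hc
      rw [if_pos ⟨rfl, rfl⟩, if_pos (by omega)]
    · rw [if_neg hc]
      split_ifs with h1 h2 <;> first | rfl | omega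
  refine ⟨hQend.1, fun i j hi hj => ?_⟩
  rw [hQend.2 i j hi hj]
  split_ifs with h1 h2 <;> first | rfl | omega

theorem pvFinal (g : Nat → Int) (N w : Nat) (hw : N ≤ w+1) (mem : List (List Int))
    (h : pvTS g N w mem) : mem = pvTgt g N := by
  obtain ⟨⟨hl, hr⟩, hc⟩ := h
  apply List.ext_getElem (by simp [pvTgt, hl])
  intro i hi hi'
  have hiN : i < N := by omega
  have hrl : mem[i].length = N := hr _ (List.getElem_mem hi)
  have htgt : (pvTgt g N)[i] = pvRow g N i := by
    simp [pvTgt]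
  rw [htgt]
  apply List.ext_getElem (by simp [pvRow, hrl])
  intro j hj hj'
  have hjN : j < N := hrl ▸ hj
  have hcell : mem[i][j] = pvGetC mem i j := by
    unfold pvGetC
    rw [show mem.getD i [] = mem[i] from List.getD_eq_getElem _ _ (by omega)]
    rw [List.getD_eq_getElem _ _ hj]
  rw [hcell, hc i j hiN hjN]
  have hrowj : (pvRow g N i)[j] = if i ≤ j then pvV g i j else 0 := by
    simp [pvRow]
  rw [hrowj]
  split_ifs with h1 h2 <;> first | rfl | omega

theorem pvCell0 (N : Nat) :
    (pvRect N (List.replicate N (List.replicate N (0:Int))) ∧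
     ∀ i j, i < N → j < N → pvGetC (List.replicate N (List.replicate N (0:Int))) i j = 0) := by
  refine ⟨⟨by simp, by intro r hr; rw [List.eq_of_mem_replicate hr]; simp⟩, ?_⟩
  intro i j hi hj
  unfold pvGetC
  rw [show (List.replicate N (List.replicate N (0:Int))).getD i [] = List.replicate N 0 from by
        rw [List.getD_eq_getElem _ _ (by simpa), List.getElem_replicate]]
  rw [List.getD_eq_getElem _ _ (by simpa), List.getElem_replicate]

theorem pvA_eq (monedas : List Int) (N : Nat) :
    juego_dinamico monedas (N : Int) = pvTgt (fun k => monedas.getD k 0) N := by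
  unfold juego_dinamico
  dsimp only
  rw [PySem.List.pyRange_one 0 (N:Int), show ((N:Int) - 0).toNat = N from by omega]
  rw [PySem.List.pyRange_one 0 ((N:Int)-1), show ((N:Int) - 1 - 0).toNat = N - 1 from by omega]
  rw [PySem.List.pyRange_one 2 (N:Int), show ((N:Int) - 2).toNat = N - 2 from by omega]
  rw [List.foldl_map, List.foldl_map, List.foldl_map]
  have hmem0 : ((List.range N).map (fun k => (0:Int) + ↑k)).map
        (fun _ => ((List.range N).map (fun k => (0:Int) + ↑k)).map (fun _ => (0:Int)))
      = List.replicate N (List.replicate N (0:Int)) := by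
    rw [List.map_const', List.map_const']
    simp
  rw [hmem0]
  have hf1 : (fun (mem : List (List Int)) (k : Nat) =>
        (fun (mem : List (List Int)) (i : Int) =>
          PySem.List.pySetD mem i (PySem.List.pySetD (PySem.List.pyGetD mem i []) i
            (PySem.List.pyGetD monedas i 0))) mem ((0:Int) + ↑k))
      = (fun mem k => pvSetC mem k k ((fun k => monedas.getD k 0) k)) := by
    funext mem k
    simp only [zero_add, PySem.List.pySetD_natCast, PySem.List.pyGetD_natCast]
    rfl
  rw [hf1]
  have hf2 : (fun (mem : List (List Int)) (k : Nat) =>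
        (fun (mem : List (List Int)) (i : Int) =>
          PySem.List.pySetD mem i (PySem.List.pySetD (PySem.List.pyGetD mem i []) (i+1)
            (max (PySem.List.pyGetD monedas i 0) (PySem.List.pyGetD monedas (i+1) 0)))) mem ((0:Int) + ↑k))
      = (fun mem k => pvSetC mem k (k+1)
          (max ((fun k => monedas.getD k 0) k) ((fun k => monedas.getD k 0) (k+1)))) := by
    funext mem k
    simp only [zero_add]
    rw [show ((k:Nat):Int)+1 = ((k+1:Nat):Int) from by omega]
    simp only [PySem.List.pySetD_natCast, PySem.List.pyGetD_natCast]
    rfl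
  rw [hf2]
  have hf3 : (fun (mem : List (List Int)) (k : Nat) =>
        (fun (mem : List (List Int)) (ventana : Int) =>
          (PySem.List.pyRange 0 ((N:Int) - ventana) 1).foldl
            (fun (mem : List (List Int)) (m_i : Int) =>
              let m_d := m_i + ventana
              let o1 := PySem.List.pyGetD monedas m_i 0 +
                PySem.List.pyGetD (PySem.List.pyGetD mem (m_i+2) []) m_d 0 *
                  (if m_i+2 ≤ m_d then (if PySem.List.pyGetD monedas (m_i+1) 0 ≤ PySem.List.pyGetD monedas m_d 0 then 1 else 0) else 0)
              let o2 := PySem.List.pyGetD monedas m_i 0 +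
                PySem.List.pyGetD (PySem.List.pyGetD mem (m_i+1) []) (m_d-1) 0 *
                  (if m_i+1 ≤ m_d-1 then (if PySem.List.pyGetD monedas m_d 0 ≤ PySem.List.pyGetD monedas (m_i+1) 0 then 1 else 0) else 0)
              let o3 := PySem.List.pyGetD monedas m_d 0 +
                PySem.List.pyGetD (PySem.List.pyGetD mem (m_i+1) []) (m_d-1) 0 *
                  (if m_i+1 ≤ m_d-1 then (if PySem.List.pyGetD monedas m_i 0 ≤ PySem.List.pyGetD monedas (m_d-1) 0 then 1 else 0) else 0)
              let o4 := PySem.List.pyGetD monedas m_d 0 +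
                PySem.List.pyGetD (PySem.List.pyGetD mem m_i []) (m_d-2) 0 *
                  (if m_i ≤ m_d-2 then (if PySem.List.pyGetD monedas (m_d-1) 0 ≤ PySem.List.pyGetD monedas m_i 0 then 1 else 0) else 0)
              PySem.List.pySetD mem m_i (PySem.List.pySetD (PySem.List.pyGetD mem m_i []) m_d
                (max (max (max o1 o2) o3) o4))) mem) mem ((2:Int) + ↑k))
      = (fun mem k => (List.range (N-(k+2))).foldl
          (fun mem t => pvSetC mem t (t+(k+2)) (pvStepVal (fun k => monedas.getD k 0) mem t (k+2))) mem) := by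
    funext mem k
    dsimp only
    rw [PySem.List.pyRange_one 0 ((N:Int) - (2+↑k)),
        show ((N:Int) - (2+↑k) - 0).toNat = N - (k+2) from by omega, List.foldl_map]
    congr 1
    funext mem' t
    dsimp only
    simp only [zero_add]
    rw [if_pos (show (t:Int)+2 ≤ ↑t+(2+↑k) from by omega),
        if_pos (show (t:Int)+1 ≤ ↑t+(2+↑k)-1 from by omega),
        if_pos (show (t:Int)+1 ≤ ↑t+(2+↑k)-1 from by omega),
        if_pos (show (t:Int) ≤ ↑t+(2+↑k)-2 from by omega)]
    rw [show (t:Int)+(2+↑k)-1 = ((t+(k+2)-1 : Nat) : Int) from by omega,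
        show (t:Int)+(2+↑k)-2 = ((t+(k+2)-2 : Nat) : Int) from by omega,
        show (t:Int)+(2+↑k) = ((t+(k+2) : Nat) : Int) from by omega,
        show (t:Int)+2 = ((t+2 : Nat) : Int) from by omega,
        show (t:Int)+1 = ((t+1 : Nat) : Int) from by omega]
    simp only [PySem.List.pySetD_natCast, PySem.List.pyGetD_natCast]
    rfl
  rw [hf3]
  have h1 := pvLoop1 (fun k => monedas.getD k 0) N _ (pvCell0 N)
  have h2 := pvLoop2 (fun k => monedas.getD k 0) N _ h1
  have h3 := pvInv2_TS (fun k => monedas.getD k 0) N _ h2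
  have hout := pvFoldlRangeInv _ (fun k mem => pvTS (fun k => monedas.getD k 0) N (k+1) mem)
      (N-2) _ h3 (fun k b hk hQ => pvInner (fun k => monedas.getD k 0) N (k+2) (by omega) b hQ)
  exact pvFinal (fun k => monedas.getD k 0) N (N-2+1) (by omega) _ hout

-- ===== B-side proofs: the memoized recursion computes pvV =====
def pvGood (g : Nat → Int) (d : PySem.Dict (Int × Int) Int) : Prop :=
  ∀ (i j : Nat) (v : Int), d.get? ((i:Int), (j:Int)) = some v → v = pvV g i j

theorem pvGood_empty (g : Nat → Int) : pvGood g PySem.Dict.empty := by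
  intro i j v h
  rw [PySem.Dict.get?_empty] at h
  exact absurd h (by simp)

theorem pvValorB_spec (monedas : List Int) :
    ∀ (fuel : Nat) (i j : Nat) (memo : PySem.Dict (Int × Int) Int),
      pvGood (fun k => monedas.getD k 0) memo → i ≤ j → j - i < 2*fuel →
      (pvValorB monedas fuel memo (i:Int) (j:Int)).1 = pvV (fun k => monedas.getD k 0) i j ∧
      pvGood (fun k => monedas.getD k 0) (pvValorB monedas fuel memo (i:Int) (j:Int)).2 := by
  intro fuel
  induction fuel with
  | zero => intro i j memo _ _ hf; omega
  | succ fuel ih =>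
    intro i j memo hG hij hf
    rw [pvValorB]
    by_cases hc : memo.contains ((i:Int), (j:Int))
    · rw [if_pos hc]
      have hs : (memo.get? ((i:Int), (j:Int))).isSome := by
        rw [← PySem.Dict.contains_eq_isSome_get?]; exact hc
      obtain ⟨v, hv⟩ := Option.isSome_iff_exists.mp hs
      refine ⟨?_, hG⟩
      rw [PySem.Dict.getD_eq_get?_getD, hv, Option.getD_some]
      exact hG i j v hv
    · rw [if_neg hc]
      -- compute the value and the memo after the recursive calls
      have key : ∀ (vm : Int × PySem.Dict (Int × Int) Int),
          vm.1 = pvV (fun k => monedas.getD k 0) i j →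
          pvGood (fun k => monedas.getD k 0) vm.2 →
          ((vm.2.insert ((i:Int), (j:Int)) vm.1).getD ((i:Int), (j:Int)) 0
              = pvV (fun k => monedas.getD k 0) i j ∧
            pvGood (fun k => monedas.getD k 0) (vm.2.insert ((i:Int), (j:Int)) vm.1)) := by
        intro vm h1 h2
        constructor
        · rw [PySem.Dict.getD_insert_self]; exact h1
        · intro i' j' v' hv'
          rw [PySem.Dict.get?_insert] at hv'
          by_cases he : ((i':Int), (j':Int)) = ((i:Int), (j:Int))
          · rw [if_pos he] at hv'
            have : i' = i ∧ j' = j := by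
              have h1' := congrArg Prod.fst he
              have h2' := congrArg Prod.snd he
              simp only at h1' h2'
              omega
            obtain ⟨rfl, rfl⟩ := this
            cases hv'
            exact h1
          · rw [if_neg he] at hv'
            exact h2 i' j' v' hv'
      by_cases h0 : j = i
      · subst h0
        rw [if_pos rfl]
        refine key _ ?_ hG
        rw [PySem.List.pyGetD_natCast, pvV_base1]
      · rw [if_neg (by exact_mod_cast h0)]
        by_cases h1 : j = i + 1
        · subst h1
          rw [if_pos (by push_cast; ring)]
          refine key _ ?_ hG
          rw [PySem.List.pyGetD_natCast, PySem.List.pyGetD_natCast, pvV_base2]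
        · have hij2 : i + 2 ≤ j := by omega
          rw [if_neg (by intro h; apply h1; exact_mod_cast h)]
          have e1 : (i:Int) + 2 = ((i+2 : Nat) : Int) := by omega
          have e2 : (i:Int) + 1 = ((i+1 : Nat) : Int) := by omega
          have e3 : (j:Int) - 1 = ((j-1 : Nat) : Int) := by omega
          have e4 : (j:Int) - 2 = ((j-2 : Nat) : Int) := by omega
          have r1 := ih (i+2) j memo hG (by omega) (by omega)
          rw [← e1] at r1
          have r2 := ih (i+1) (j-1) (pvValorB monedas fuel memo ((i:Int)+2) (j:Int)).2
            r1.2 (by omega) (by omega)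
          rw [← e2, ← e3] at r2
          have r3 := ih i (j-2)
            (pvValorB monedas fuel (pvValorB monedas fuel memo ((i:Int)+2) (j:Int)).2
              ((i:Int)+1) ((j:Int)-1)).2 r2.2 (by omega) (by omega)
          rw [← e4] at r3
          refine key _ ?_ r3.2
          dsimp only
          rw [r1.1, r2.1, r3.1]
          rw [e2, e3]
          simp only [PySem.List.pyGetD_natCast]
          rw [pvV_step (fun k => monedas.getD k 0) i j hij2]

theorem pvB_inner (monedas : List Int) (N i : Nat) (d : PySem.Dict (Int × Int) Int)
    (hd : pvGood (fun k => monedas.getD k 0) d) :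
    ((((List.range N).map (fun k => ((k:Nat):Int))).foldl
        (fun (q : List Int × PySem.Dict (Int × Int) Int) j =>
          if ((i:Nat):Int) ≤ j then
            (q.1 ++ [(pvValorB monedas ((N:Int)).toNat q.2 ((i:Nat):Int) j).1],
             (pvValorB monedas ((N:Int)).toNat q.2 ((i:Nat):Int) j).2)
          else (q.1 ++ [(0 : Int)], q.2)) ([], d)).1
        = pvRow (fun k => monedas.getD k 0) N i)
    ∧ pvGood (fun k => monedas.getD k 0)
        ((((List.range N).map (fun k => ((k:Nat):Int))).foldl
          (fun (q : List Int × PySem.Dict (Int × Int) Int) j =>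
            if ((i:Nat):Int) ≤ j then
              (q.1 ++ [(pvValorB monedas ((N:Int)).toNat q.2 ((i:Nat):Int) j).1],
               (pvValorB monedas ((N:Int)).toNat q.2 ((i:Nat):Int) j).2)
            else (q.1 ++ [(0 : Int)], q.2)) ([], d)).2) := by
  rw [List.foldl_map]
  exact pvFoldlRangeInv
    (fun (q : List Int × PySem.Dict (Int × Int) Int) (j : Nat) =>
      if ((i:Nat):Int) ≤ ((j:Nat):Int) then
        (q.1 ++ [(pvValorB monedas ((N:Int)).toNat q.2 ((i:Nat):Int) ((j:Nat):Int)).1],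
         (pvValorB monedas ((N:Int)).toNat q.2 ((i:Nat):Int) ((j:Nat):Int)).2)
      else (q.1 ++ [(0 : Int)], q.2))
    (fun s q => (q.1 = (List.range s).map
        (fun j => if i ≤ j then pvV (fun k => monedas.getD k 0) i j else 0))
      ∧ pvGood (fun k => monedas.getD k 0) q.2)
    N ([], d) ⟨by simp, hd⟩ (by
      intro s q hs hQ
      obtain ⟨hq1, hq2⟩ := hQ
      dsimp only
      by_cases hle : i ≤ s
      · rw [if_pos (by exact_mod_cast hle)]
        have hv := pvValorB_spec monedas ((N:Int)).toNat i s q.2 hq2 hle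
          (by rw [Int.toNat_natCast]; omega)
        refine ⟨?_, hv.2⟩
        rw [List.range_succ, List.map_append, hq1, hv.1]
        simp [hle]
      · rw [if_neg (by intro h; apply hle; exact_mod_cast h)]
        refine ⟨?_, hq2⟩
        rw [List.range_succ, List.map_append, hq1]
        simp [hle])

theorem pvB_eq (monedas : List Int) (N : Nat) :
    juego_dinamico_alt monedas (N:Int) = pvTgt (fun k => monedas.getD k 0) N := by
  unfold juego_dinamico_alt
  rw [PySem.List.pyRange_one 0 (N:Int), show ((N:Int) - 0).toNat = N from by omega,
      List.foldl_map]
  exact (pvFoldlRangeInv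
    (fun (p : List (List Int) × PySem.Dict (Int × Int) Int) (i : Nat) =>
      let q := ((List.range N).map (fun k => (0:Int) + ↑k)).foldl
        (fun (q : List Int × PySem.Dict (Int × Int) Int) j =>
          if ((0:Int) + ↑i) ≤ j then
            let r := pvValorB monedas ((N:Int)).toNat q.2 ((0:Int) + ↑i) j
            (q.1 ++ [r.1], r.2)
          else (q.1 ++ [(0 : Int)], q.2)) ([], p.2)
      (p.1 ++ [q.1], q.2))
    (fun t p => (p.1 = (List.range t).map (pvRow (fun k => monedas.getD k 0) N))
      ∧ pvGood (fun k => monedas.getD k 0) p.2)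
    N ([], PySem.Dict.empty) ⟨by simp, pvGood_empty _⟩ (by
      intro i b hi hQ
      obtain ⟨hb1, hb2⟩ := hQ
      dsimp only
      simp only [zero_add]
      obtain ⟨h1, h2⟩ := pvB_inner monedas N i b.2 hb2
      refine ⟨?_, h2⟩
      rw [List.range_succ, List.map_append, hb1, h1]
      simp)).1

theorem pvA_nil (monedas : List Int) (n : Int) (hn : n < 0) :
    juego_dinamico monedas n = [] := by
  unfold juego_dinamico
  dsimp only
  rw [PySem.List.pyRange_one_eq_nil (by omega : n ≤ 0),
      PySem.List.pyRange_one_eq_nil (by omega : n - 1 ≤ 0),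
      PySem.List.pyRange_one_eq_nil (by omega : n ≤ 2)]
  simp

theorem pvB_nil (monedas : List Int) (n : Int) (hn : n < 0) :
    juego_dinamico_alt monedas n = [] := by
  unfold juego_dinamico_alt
  rw [PySem.List.pyRange_one_eq_nil (by omega : n ≤ 0)]
  rfl

-- ===== VERDICT (by name: the statement is the Claim_ definition above) =====
theorem juego_dinamico_spec : Claim_equal_juego_dinamico := by
  intro monedas n _ _
  unfold Spec_juego_dinamico
  by_cases hn : 0 ≤ n
  · obtain ⟨N, rfl⟩ : ∃ N : Nat, n = (N:Int) := ⟨n.toNat, by omega⟩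
    rw [pvA_eq, pvB_eq]
  · rw [pvA_nil monedas n (by omega), pvB_nil monedas n (by omega)]
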